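-- pv_equiv track=rewrite | github.com/harshaas21-arch/DSA | AI.py | generate_assembly
-- ===== SOURCE A (Python) =====
-- def generate_assembly(postfix):
--     """Generates RISC-V assembly instructions from postfix tokens."""
--     stack = []
--     assembly = []
--     reg_count = 0
--     ops = {'+': 'add', '-': 'sub', '*': 'mul', '/': 'div'}
--
--     for token in postfix:
--         if token.isalnum():
--             stack.append(token)
--         else:
--             arg2 = stack.pop()
--             arg1 = stack.pop()
--             dest = f"t{reg_count}"  # Temporary register
--
--             instr = ops[token]
--             assembly.append(f"{instr} {dest}, {arg1}, {arg2}")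
--
--             stack.append(dest)
--             reg_count += 1
--
--     return assembly
-- ===== SOURCE B (Python) =====
-- def generate_assembly(postfix):
--     """Generates RISC-V assembly instructions from postfix tokens.
--
--     Different decomposition: first builds an expression tree (forest) from the
--     postfix tokens, then emits instructions by a post-order recursive traversal
--     with a register counter shared across the whole forest."""
--     ops = {'+': 'add', '-': 'sub', '*': 'mul', '/': 'div'}
--     # phase 1: build a forest of expression trees
--     stack = []
--     for token in postfix:
--         if token.isalnum():
--             stack.append((token,))                   # leaf
--         else:
--             right = stack.pop()
--             left = stack.pop()
--             stack.append((ops[token], left, right))  # operator node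
--     # phase 2: post-order emission
--     assembly = []
--     counter = [0]
--
--     def emit(node):
--         if len(node) == 1:
--             return node[0]
--         instr, left, right = node
--         a1 = emit(left)
--         a2 = emit(right)
--         dest = f"t{counter[0]}"
--         counter[0] += 1
--         assembly.append(f"{instr} {dest}, {a1}, {a2}")
--         return dest
--
--     for tree in stack:
--         emit(tree)
--     return assembly
-- ===== Notes on version B (the rewrite author's own statement) =====
-- stated objective: alternative
-- what changed: Replaces the single-pass register-stack scan with two phases: build an expression tree/forest from the postfix tokens, then emit instructions by a post-order recursive traversal that allocates registers during emission.
import Mathlib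
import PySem

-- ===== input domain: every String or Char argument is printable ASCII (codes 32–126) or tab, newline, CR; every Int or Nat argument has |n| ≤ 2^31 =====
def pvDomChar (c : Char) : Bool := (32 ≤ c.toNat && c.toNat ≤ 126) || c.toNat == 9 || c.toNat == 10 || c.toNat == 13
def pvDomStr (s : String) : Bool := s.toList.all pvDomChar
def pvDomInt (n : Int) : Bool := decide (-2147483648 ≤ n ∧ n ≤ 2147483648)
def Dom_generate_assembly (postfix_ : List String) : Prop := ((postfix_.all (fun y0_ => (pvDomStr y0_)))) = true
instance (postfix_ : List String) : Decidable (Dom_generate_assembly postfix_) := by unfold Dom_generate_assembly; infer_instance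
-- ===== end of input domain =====

-- B replaces A's single-pass register-stack scan by a two-phase decomposition (build an
-- expression forest from the postfix tokens, then emit by post-order traversal); objective:
-- alternative structure, same complexity.

-- the dict literal ops = {'+': 'add', '-': 'sub', '*': 'mul', '/': 'div'} (lookup; none = KeyError)
def opLookup (token : String) : Option String :=
  if token = "+" then some "add"
  else if token = "-" then some "sub"
  else if token = "*" then some "mul"
  else if token = "/" then some "div"
  else none

-- ===== PORT A =====
-- state: (stack, assembly, reg_count); none = an exception was raised (pop on short stack / KeyError)
def gaStepA (st : Option (List String × List String × Int)) (token : String) :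
    Option (List String × List String × Int) :=
  match st with
  | none => none
  | some (stack, assembly, reg_count) =>
    if PySem.Str.strIsalnum token then some (token :: stack, assembly, reg_count)
    else
      match stack with
      | arg2 :: arg1 :: rest =>
        match opLookup token with
        | some instr =>
          let dest := "t" ++ PySem.Int.toStr reg_count
          some (dest :: rest,
                assembly ++ [instr ++ " " ++ dest ++ ", " ++ arg1 ++ ", " ++ arg2],
                reg_count + 1)
        | none => none
      | _ => none

def generate_assembly (postfix_ : List String) : List String :=
  match postfix_.foldl gaStepA (some ([], [], 0)) with
  | some (_, assembly, _) => assembly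
  | none => []

-- ===== PORT B =====
-- expression tree: leaf = operand token, node = mnemonic with two children
inductive PTree
  | leaf : String → PTree
  | node : String → PTree → PTree → PTree
deriving DecidableEq, Repr

-- phase 1: build the forest (stack of trees); none = exception
def gaStepB (st : Option (List PTree)) (token : String) : Option (List PTree) :=
  match st with
  | none => none
  | some stack =>
    if PySem.Str.strIsalnum token then some (PTree.leaf token :: stack)
    else
      match stack with
      | right :: left :: rest =>
        match opLookup token with
        | some instr => some (PTree.node instr left right :: rest)
        | none => none
      | _ => none

-- phase 2: post-order emission; returns (instructions, operand name, next register counter)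
def emit : PTree → Int → List String × String × Int
  | PTree.leaf s, _c => ([], s, _c)
  | PTree.node instr l r, c =>
    let p := emit l c
    let q := emit r p.2.2
    let dest := "t" ++ PySem.Int.toStr q.2.2
    (p.1 ++ q.1 ++ [instr ++ " " ++ dest ++ ", " ++ p.2.1 ++ ", " ++ q.2.1], dest, q.2.2 + 1)

-- 'for tree in stack: emit(tree)' with the shared counter and collected instructions
def emitForest : List PTree → Int → List String × List String × Int
  | [], c => ([], [], c)
  | t :: ts, c =>
    let p := emit t c
    let q := emitForest ts p.2.2
    (p.1 ++ q.1, p.2.1 :: q.2.1, q.2.2)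

def generate_assembly_alt (postfix_ : List String) : List String :=
  match postfix_.foldl gaStepB (some []) with
  | some stack => (emitForest stack.reverse 0).1   -- bottom-to-top iteration over the Python list
  | none => []

-- ===== PRECONDITION & SPEC =====
-- Pre_ excludes exactly the inputs on which Python A raises: a non-alnum token that is not one
-- of the four operator keys (KeyError), or an operator reached with fewer than two operands on
-- the stack (IndexError from pop).
def Pre_generate_assembly (postfix_ : List String) : Prop :=
  ∀ i : Fin postfix_.length,
    PySem.Str.strIsalnum postfix_[i] = false →
      (postfix_[i] = "+" ∨ postfix_[i] = "-" ∨ postfix_[i] = "*" ∨ postfix_[i] = "/") ∧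
      (postfix_.take i).countP (fun t => !PySem.Str.strIsalnum t) + 2 ≤
        (postfix_.take i).countP (fun t => PySem.Str.strIsalnum t)
instance (postfix_ : List String) : Decidable (Pre_generate_assembly postfix_) := by
  unfold Pre_generate_assembly; infer_instance

def pvWitness_generate_assembly : List String := ["a", "b", "+", "c7", "*"]

def Spec_generate_assembly (postfix_ : List String) (out : List String) : Prop := out = generate_assembly_alt postfix_
instance (postfix_ : List String) (out : List String) : Decidable (Spec_generate_assembly postfix_ out) := by unfold Spec_generate_assembly; infer_instance

-- ===== CLAIM (what is proved, stated in full; the proofs are below) =====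
def Claim_equal_generate_assembly : Prop := ∀ (postfix_ : List String), Dom_generate_assembly postfix_ → Pre_generate_assembly postfix_ → Spec_generate_assembly postfix_ (generate_assembly postfix_)

-- ===== LEMMAS AND PROOFS =====

lemma emitForest_append (xs ys : List PTree) (c : Int) :
    emitForest (xs ++ ys) c =
      ((emitForest xs c).1 ++ (emitForest ys (emitForest xs c).2.2).1,
       (emitForest xs c).2.1 ++ (emitForest ys (emitForest xs c).2.2).2.1,
       (emitForest ys (emitForest xs c).2.2).2.2) := by
  induction xs generalizing c with
  | nil => simp [emitForest]
  | cons t ts ih => simp [emitForest, ih]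

-- the simulation relation between A's fold state and B's forest
def gaRel : Option (List String × List String × Int) → Option (List PTree) → Prop
  | none, none => True
  | some (st, asm, reg), some f =>
      st = (emitForest f.reverse 0).2.1.reverse ∧
      asm = (emitForest f.reverse 0).1 ∧
      reg = (emitForest f.reverse 0).2.2
  | _, _ => False

lemma Rel_step (token : String) (sa : Option (List String × List String × Int))
    (sb : Option (List PTree)) (h : gaRel sa sb) :
    gaRel (gaStepA sa token) (gaStepB sb token) := by
  match sa, sb with
  | none, none => simpa [gaStepA, gaStepB] using h
  | none, some _ => exact absurd h (by simp [gaRel])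
  | some (st, asm, reg), none => exact absurd h (by simp [gaRel])
  | some (st, asm, reg), some f =>
    obtain ⟨hst, hasm, hreg⟩ := h
    by_cases halnum : PySem.Str.strIsalnum token
    · -- push a leaf / push the token
      simp only [gaStepA, gaStepB, halnum, if_true]
      refine ⟨?_, ?_, ?_⟩ <;>
        simp [List.reverse_cons, emitForest_append, emitForest, emit, hst, hasm, hreg]
    · simp only [gaStepA, gaStepB, halnum]
      match f with
      | [] =>
        have : st = [] := by simpa [emitForest] using hst
        simp [this, gaRel]
      | [x] =>
        have : st = [(emit x 0).2.1] := by
          simpa [emitForest] using hst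
        simp [this, gaRel]
      | r :: l :: rest =>
        have hrev : (r :: l :: rest).reverse = rest.reverse ++ [l] ++ [r] := by simp
        rw [hrev] at hst hasm hreg
        rw [emitForest_append, emitForest_append] at hst hasm hreg
        simp only [emitForest] at hst hasm hreg
        -- name the three stages
        set P := emitForest rest.reverse 0 with hP
        set L := emit l P.2.2 with hL
        set R := emit r L.2.2 with hR
        simp only [List.reverse_append, List.reverse_cons, List.reverse_nil, List.nil_append,
          List.cons_append] at hst
        -- st = R.2.1 :: L.2.1 :: P.2.1.reverse
        cases hop : opLookup token with
        | none => simp [hst, gaRel]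
        | some instr =>
          simp only [hst]
          refine ⟨?_, ?_, ?_⟩ <;>
          · simp only [List.reverse_cons]
            rw [emitForest_append]
            simp [emitForest, emit, ← hP, ← hL, ← hR, hasm, hreg]

lemma Rel_foldl (ts : List String) (sa : Option (List String × List String × Int))
    (sb : Option (List PTree)) (h : gaRel sa sb) :
    gaRel (ts.foldl gaStepA sa) (ts.foldl gaStepB sb) := by
  induction ts generalizing sa sb with
  | nil => exact h
  | cons t ts ih => exact ih _ _ (Rel_step t sa sb h)

-- ===== VERDICT (by name: the statement is the Claim_ definition above) =====
theorem generate_assembly_spec : Claim_equal_generate_assembly := by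
  intro postfix_ _hDom _hPre
  unfold Spec_generate_assembly generate_assembly generate_assembly_alt
  have h0 : gaRel (some ([], [], 0)) (some []) := by simp [gaRel, emitForest]
  have h := Rel_foldl postfix_ _ _ h0
  match hA : postfix_.foldl gaStepA (some ([], [], 0)),
        hB : postfix_.foldl gaStepB (some []) with
  | none, none => simp
  | none, some f => rw [hA, hB] at h; exact absurd h (by simp [gaRel])
  | some (st, asm, reg), none => rw [hA, hB] at h; exact absurd h (by simp [gaRel])
  | some (st, asm, reg), some f =>
    rw [hA, hB] at h
    exact h.2.1
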